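-- pv_equiv track=rewrite | github.com/Seaocn/Dyn-Backdoor | backdoor.py | sub_replace
-- ===== SOURCE A (Python) =====
-- def sub_replace(trainX,trainY, sub_list, trainX_idx, train_edge_idx):
--     j_time = [0, 1, 2, 3, 4, 5, 6, 7, 8, 9]
--     for i in trainX_idx:
--             for m, row_edge, col_edge in train_edge_idx:
--                 replace_nodes = [row_edge,col_edge,274,275,276,277]
--                 if i == m:
--                     for j in j_time:
--                         for row, col in sub_list:
--                             if row<=1 and col <= 1:
--                                 pass
--                             else:
--                                 trainX[i][j][replace_nodes[row]][replace_nodes[col]] = 1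
--
--
--                     trainY[i][row_edge][col_edge] = 0
--
--
--     return trainX, trainY
-- ===== SOURCE B (Python) =====
-- def sub_replace(trainX, trainY, sub_list, trainX_idx, train_edge_idx):
--     # Index the edges by their first component once, instead of rescanning
--     # train_edge_idx for every i; hoist the pair filter out of the loops.
--     groups = {}
--     for m, row_edge, col_edge in train_edge_idx:
--         groups.setdefault(m, []).append((row_edge, col_edge))
--     active = [(row, col) for row, col in sub_list if not (row <= 1 and col <= 1)]
--     for i in trainX_idx:
--         for row_edge, col_edge in groups.get(i, []):
--             nodes = [row_edge, col_edge, 274, 275, 276, 277]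
--             for j in range(10):
--                 for row, col in active:
--                     trainX[i][j][nodes[row]][nodes[col]] = 1
--             trainY[i][row_edge][col_edge] = 0
--     return trainX, trainY
-- ===== Notes on version B (the rewrite author's own statement) =====
-- stated objective: faster
-- what changed: B builds a dict indexing train_edge_idx by its first component once and looks it up per i (removing A's inner rescan of all edges for every i), and hoists the sub_list (row<=1,col<=1) filter out of the loops.
import Mathlib
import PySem

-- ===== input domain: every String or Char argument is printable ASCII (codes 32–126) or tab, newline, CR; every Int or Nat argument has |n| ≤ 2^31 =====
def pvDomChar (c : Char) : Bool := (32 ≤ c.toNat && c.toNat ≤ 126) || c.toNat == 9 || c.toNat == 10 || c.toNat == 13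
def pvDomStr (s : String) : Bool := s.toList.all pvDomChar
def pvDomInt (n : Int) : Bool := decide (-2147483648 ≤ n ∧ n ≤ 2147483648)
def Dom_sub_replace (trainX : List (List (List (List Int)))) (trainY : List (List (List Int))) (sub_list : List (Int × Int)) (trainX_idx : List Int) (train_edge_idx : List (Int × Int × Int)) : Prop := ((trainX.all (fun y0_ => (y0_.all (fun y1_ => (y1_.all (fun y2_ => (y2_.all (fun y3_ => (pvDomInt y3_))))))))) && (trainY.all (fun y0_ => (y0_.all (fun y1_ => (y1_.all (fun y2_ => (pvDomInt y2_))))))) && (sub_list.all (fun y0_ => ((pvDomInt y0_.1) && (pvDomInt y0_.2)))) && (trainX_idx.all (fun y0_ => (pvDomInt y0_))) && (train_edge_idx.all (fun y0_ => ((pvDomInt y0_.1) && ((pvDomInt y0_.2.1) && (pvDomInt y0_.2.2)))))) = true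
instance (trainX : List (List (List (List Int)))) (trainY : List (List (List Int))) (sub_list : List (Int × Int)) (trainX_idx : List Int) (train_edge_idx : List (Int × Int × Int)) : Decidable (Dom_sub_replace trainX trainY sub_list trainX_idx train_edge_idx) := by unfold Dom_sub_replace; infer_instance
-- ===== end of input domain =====

-- B indexes train_edge_idx by its first component in a dict once (O(N+M) instead of A's
-- O(N·M) rescans) and hoists the sub_list filter out of the loops; return values proved
-- equal — both Pythons also mutate trainX/trainY in place identically (same writes).

-- Shared write helpers: Python's in-place `xs[i] = v` through nested lists, as a single
-- structural pass per level (exact for every in-range index, including negative ones;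
-- on an out-of-range index Python raises IndexError — excluded by Pre_ — and this
-- total form leaves the list unchanged).
def pyModIdx {α : Type} (f : α → α) : List α → Int → List α
  | [], _ => []
  | x :: xs, n => if n = 0 then f x :: xs else x :: pyModIdx f xs (n - 1)

def pyModifyI {α : Type} (xs : List α) (i : Int) (f : α → α) : List α :=
  pyModIdx f xs (if i < 0 then i + xs.length else i)

def setX4 (X : List (List (List (List Int)))) (i j a b : Int) : List (List (List (List Int))) :=
  pyModifyI X i (fun Xi => pyModifyI Xi j (fun Xij => pyModifyI Xij a (fun row => pyModifyI row b (fun _ => 1))))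

def setY3 (Y : List (List (List Int))) (i r c : Int) : List (List (List Int)) :=
  pyModifyI Y i (fun Yi => pyModifyI Yi r (fun row => pyModifyI row c (fun _ => 0)))

-- ===== PORT A =====
def sub_replace (trainX : List (List (List (List Int)))) (trainY : List (List (List Int))) (sub_list : List (Int × Int)) (trainX_idx : List Int) (train_edge_idx : List (Int × Int × Int)) : List (List (List (List Int))) × List (List (List Int)) :=
  let j_time : List Int := [0, 1, 2, 3, 4, 5, 6, 7, 8, 9]
  trainX_idx.foldl (fun st i =>
    train_edge_idx.foldl (fun st e =>
      let replace_nodes : List Int := [e.2.1, e.2.2, 274, 275, 276, 277]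
      if i = e.1 then
        let X' := j_time.foldl (fun X j =>
          sub_list.foldl (fun X p =>
            if p.1 ≤ 1 ∧ p.2 ≤ 1 then X
            else setX4 X i j (PySem.List.pyGetD replace_nodes p.1 0) (PySem.List.pyGetD replace_nodes p.2 0)) X) st.1
        (X', setY3 st.2 i e.2.1 e.2.2)
      else st) st) (trainX, trainY)

-- ===== PORT B =====
def sub_replace_alt (trainX : List (List (List (List Int)))) (trainY : List (List (List Int))) (sub_list : List (Int × Int)) (trainX_idx : List Int) (train_edge_idx : List (Int × Int × Int)) : List (List (List (List Int))) × List (List (List Int)) :=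
  let groups : PySem.Dict Int (List (Int × Int)) :=
    train_edge_idx.foldl (fun d e => d.modify e.1 [] (fun v => v ++ [(e.2.1, e.2.2)])) PySem.Dict.empty
  let active : List (Int × Int) := sub_list.filter (fun p => !(decide (p.1 ≤ 1) && decide (p.2 ≤ 1)))
  trainX_idx.foldl (fun st i =>
    (groups.getD i []).foldl (fun st rc =>
      let nodes : List Int := [rc.1, rc.2, 274, 275, 276, 277]
      let X' := (PySem.List.pyRange 0 10 1).foldl (fun X j =>
        active.foldl (fun X p =>
          setX4 X i j (PySem.List.pyGetD nodes p.1 0) (PySem.List.pyGetD nodes p.2 0)) X) st.1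
      (X', setY3 st.2 i rc.1 rc.2)) st) (trainX, trainY)

-- ===== PRECONDITION & SPEC =====
def pvInRange (len : Nat) (i : Int) : Bool := decide (-(len : Int) ≤ i ∧ i < (len : Int))

-- bounds check for one matched edge: the trainY cell exists, and (only if some sub_list
-- pair is active) every trainX cell the ten j-steps write exists
def pvEdgeOK (trainX : List (List (List (List Int)))) (trainY : List (List (List Int))) (sub_list : List (Int × Int)) (i r c : Int) : Bool :=
  let nodes : List Int := [r, c, 274, 275, 276, 277]
  let yOK :=
    match PySem.List.pyGet? trainY i with
    | none => false
    | some Yi =>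
      match PySem.List.pyGet? Yi r with
      | none => false
      | some row => pvInRange row.length c
  let hasActive := sub_list.any (fun p => !(decide (p.1 ≤ 1) && decide (p.2 ≤ 1)))
  let xOK :=
    !hasActive ||
    (match PySem.List.pyGet? trainX i with
     | none => false
     | some Xi =>
       (List.range 10).all (fun j =>
         match PySem.List.pyGet? Xi (j : Int) with
         | none => false
         | some Xij =>
           sub_list.all (fun p =>
             (decide (p.1 ≤ 1) && decide (p.2 ≤ 1)) ||
             (match PySem.List.pyGet? nodes p.1, PySem.List.pyGet? nodes p.2 with
              | some a, some b =>
                (match PySem.List.pyGet? Xij a with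
                 | none => false
                 | some row => pvInRange row.length b)
              | _, _ => false))))
  xOK && yOK

-- Pre_ = exactly the inputs where Python A raises no IndexError: every index chain A
-- dereferences for a matched edge is in range (writes never change list lengths).
def Pre_sub_replace (trainX : List (List (List (List Int)))) (trainY : List (List (List Int))) (sub_list : List (Int × Int)) (trainX_idx : List Int) (train_edge_idx : List (Int × Int × Int)) : Prop :=
  (trainX_idx.all (fun i => train_edge_idx.all (fun e =>
    (i != e.1) || pvEdgeOK trainX trainY sub_list i e.2.1 e.2.2))) = true
instance (trainX : List (List (List (List Int)))) (trainY : List (List (List Int))) (sub_list : List (Int × Int)) (trainX_idx : List Int) (train_edge_idx : List (Int × Int × Int)) : Decidable (Pre_sub_replace trainX trainY sub_list trainX_idx train_edge_idx) := by unfold Pre_sub_replace; infer_instance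

def pvWitness_sub_replace : List (List (List (List Int))) × List (List (List Int)) × (List (Int × Int)) × List Int × (List (Int × Int × Int)) :=
  ([[[[7]]]], [[[5]]], [(0, 1)], [0], [(0, 0, 0)])

def Spec_sub_replace (trainX : List (List (List (List Int)))) (trainY : List (List (List Int))) (sub_list : List (Int × Int)) (trainX_idx : List Int) (train_edge_idx : List (Int × Int × Int)) (out : List (List (List (List Int))) × List (List (List Int))) : Prop := out = sub_replace_alt trainX trainY sub_list trainX_idx train_edge_idx
instance (trainX : List (List (List (List Int)))) (trainY : List (List (List Int))) (sub_list : List (Int × Int)) (trainX_idx : List Int) (train_edge_idx : List (Int × Int × Int)) (out : List (List (List (List Int))) × List (List (List Int))) : Decidable (Spec_sub_replace trainX trainY sub_list trainX_idx train_edge_idx out) := by unfold Spec_sub_replace; infer_instance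

-- ===== CLAIM (what is proved, stated in full; the proofs are below) =====
def Claim_equal_sub_replace : Prop := ∀ (trainX : List (List (List (List Int)))) (trainY : List (List (List Int))) (sub_list : List (Int × Int)) (trainX_idx : List Int) (train_edge_idx : List (Int × Int × Int)), Dom_sub_replace trainX trainY sub_list trainX_idx train_edge_idx → Pre_sub_replace trainX trainY sub_list trainX_idx train_edge_idx → Spec_sub_replace trainX trainY sub_list trainX_idx train_edge_idx (sub_replace trainX trainY sub_list trainX_idx train_edge_idx)

-- ===== LEMMAS AND PROOFS =====

-- skipping the (row ≤ 1, col ≤ 1) pairs inside the loop = folding over the filtered list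
theorem pv_skip_eq {σ : Type} (f : σ → Int × Int → σ) (s : List (Int × Int)) :
    ∀ X : σ, s.foldl (fun X p => if p.1 ≤ 1 ∧ p.2 ≤ 1 then X else f X p) X
      = (s.filter (fun p => !(decide (p.1 ≤ 1) && decide (p.2 ≤ 1)))).foldl f X := by
  induction s with
  | nil => intro X; rfl
  | cons p s ih =>
    intro X
    simp only [List.foldl_cons, List.filter_cons]
    by_cases h : p.1 ≤ 1 ∧ p.2 ≤ 1
    · rw [if_pos h]
      have : (!(decide (p.1 ≤ 1) && decide (p.2 ≤ 1))) = false := by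
        simp [h.1, h.2]
      rw [this, if_neg (by simp)]
      exact ih X
    · rw [if_neg h]
      have : (!(decide (p.1 ≤ 1) && decide (p.2 ≤ 1))) = true := by
        simpa using (not_and_or.mp h)
      rw [this, if_pos rfl, List.foldl_cons]
      exact ih (f X p)

-- the dict built by the setdefault/append loop, looked up at i, is the filtered projection
theorem pv_groups_getD (l : List (Int × Int × Int)) (i : Int) :
    (l.foldl (fun d e => d.modify e.1 [] (fun v => v ++ [(e.2.1, e.2.2)])) PySem.Dict.empty).getD i []
      = (l.filter (fun e => e.1 == i)).map (fun e => (e.2.1, e.2.2)) := by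
  have h := PySem.Dict.getD_foldl_modify_append
      (l := l.map (fun e => (e.1, (e.2.1, e.2.2)))) (d := (PySem.Dict.empty : PySem.Dict Int (List (Int × Int)))) (c := i)
  rw [List.foldl_map] at h
  simpa [List.filter_map, Function.comp] using h

-- scanning all edges with `if i = m` = folding over the group of i
theorem pv_edges_eq {σ : Type} (i : Int) (G : σ → Int × Int → σ)
    (F : σ → Int × Int × Int → σ)
    (hF : ∀ st e, F st e = if i = e.1 then G st (e.2.1, e.2.2) else st) :
    ∀ (l : List (Int × Int × Int)) (st : σ),
      l.foldl F st = ((l.filter (fun e => e.1 == i)).map (fun e => (e.2.1, e.2.2))).foldl G st := by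
  intro l
  induction l with
  | nil => intro st; rfl
  | cons e l ih =>
    intro st
    simp only [List.foldl_cons, List.filter_cons, hF]
    by_cases h : i = e.1
    · rw [if_pos h, if_pos (by simpa using h.symm), List.map_cons, List.foldl_cons]
      exact ih _
    · rw [if_neg h, if_neg (by simpa using fun hh => h hh.symm)]
      exact ih st

theorem pv_range10 : PySem.List.pyRange 0 10 1 = ([0,1,2,3,4,5,6,7,8,9] : List Int) := by decide

-- ===== VERDICT (by name: the statement is the Claim_ definition above) =====
theorem sub_replace_spec : Claim_equal_sub_replace := by
  unfold Claim_equal_sub_replace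
  intro trainX trainY sub_list trainX_idx train_edge_idx _hDom _hPre
  unfold Spec_sub_replace sub_replace sub_replace_alt
  dsimp only
  apply List.foldl_ext
  intro st i _
  rw [pv_groups_getD]
  apply pv_edges_eq
  intro st e
  dsimp only
  by_cases h : i = e.1
  · rw [if_pos h, if_pos h, pv_range10]
    have hX : ∀ X : List (List (List (List Int))),
        ([0,1,2,3,4,5,6,7,8,9] : List Int).foldl (fun X j =>
            sub_list.foldl (fun X p =>
              if p.1 ≤ 1 ∧ p.2 ≤ 1 then X
              else setX4 X i j (PySem.List.pyGetD [e.2.1, e.2.2, 274, 275, 276, 277] p.1 0)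
                (PySem.List.pyGetD [e.2.1, e.2.2, 274, 275, 276, 277] p.2 0)) X) X
        = ([0,1,2,3,4,5,6,7,8,9] : List Int).foldl (fun X j =>
            (sub_list.filter (fun p => !(decide (p.1 ≤ 1) && decide (p.2 ≤ 1)))).foldl (fun X p =>
              setX4 X i j (PySem.List.pyGetD [e.2.1, e.2.2, 274, 275, 276, 277] p.1 0)
                (PySem.List.pyGetD [e.2.1, e.2.2, 274, 275, 276, 277] p.2 0)) X) X := by
      intro X
      apply List.foldl_ext
      intro X j _
      exact pv_skip_eq _ _ _
    rw [hX st.1]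
  · rw [if_neg h, if_neg h]
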